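-- pv_equiv track=rewrite | github.com/apache/arrow | integration/integration_test.py | decimal_range_from_precision
-- ===== SOURCE A (Python) =====
-- DECIMAL_PRECISION_TO_VALUE = {
--     key: (1 << (8 * i - 1)) - 1 for i, key in enumerate(
--         [1, 3, 5, 7, 10, 12, 15, 17, 19, 22, 24, 27, 29, 32, 34, 36],
--         start=1,
--     )
-- }
--
-- def decimal_range_from_precision(precision):
--     assert 1 <= precision <= 38
--     try:
--         max_value = DECIMAL_PRECISION_TO_VALUE[precision]
--     except KeyError:
--         return decimal_range_from_precision(precision - 1)
--     else:
--         return ~max_value, max_value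
-- ===== SOURCE B (Python) =====
-- # B: binary search (hand-written bisect_right) over the sorted threshold list,
-- # then compute the max value by a closed formula from the found index --
-- # no dict, no value table, no decrement recursion.
-- _THRESHOLDS = [1, 3, 5, 7, 10, 12, 15, 17, 19, 22, 24, 27, 29, 32, 34, 36]
--
-- def decimal_range_from_precision(precision):
--     assert 1 <= precision <= 38
--     lo, hi = 0, len(_THRESHOLDS)
--     while lo < hi:
--         mid = (lo + hi) // 2
--         if _THRESHOLDS[mid] <= precision:
--             lo = mid + 1
--         else:
--             hi = mid
--     max_value = (1 << (8 * lo - 1)) - 1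
--     return ~max_value, max_value
-- ===== Notes on version B (the rewrite author's own statement) =====
-- stated objective: alternative
-- what changed: Replaces A's dict lookup with KeyError-driven decrement recursion by a hand-written bisect_right binary search over the sorted threshold list, computing the max value by the closed formula (1<<(8*lo-1))-1 from the found index instead of storing a value table.
import Mathlib
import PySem

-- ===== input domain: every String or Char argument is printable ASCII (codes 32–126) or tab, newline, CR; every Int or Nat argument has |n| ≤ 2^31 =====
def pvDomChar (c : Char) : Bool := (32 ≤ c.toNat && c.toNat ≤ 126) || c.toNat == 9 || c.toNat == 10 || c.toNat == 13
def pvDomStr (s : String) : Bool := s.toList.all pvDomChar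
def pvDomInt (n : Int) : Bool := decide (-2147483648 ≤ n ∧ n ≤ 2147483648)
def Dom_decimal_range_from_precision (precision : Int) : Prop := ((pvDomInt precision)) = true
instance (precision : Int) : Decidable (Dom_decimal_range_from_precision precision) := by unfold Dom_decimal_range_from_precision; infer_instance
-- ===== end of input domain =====

-- B replaces A's dict probe + KeyError decrement recursion by a hand-written
-- binary search (bisect_right) over the sorted threshold list and a closed
-- formula for the value at the found index: objective = alternative.

-- ===== PORT A =====
def DECIMAL_PRECISION_TO_VALUE : PySem.Dict Int Int :=
  PySem.Dict.ofList
    ((PySem.List.enumerate ([1, 3, 5, 7, 10, 12, 15, 17, 19, 22, 24, 27, 29, 32, 34, 36] : List Int) 1).map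
      (fun p => (p.2, ((1 : Int) <<< (8 * p.1 - 1).toNat) - 1)))

-- fuel only makes the decrement recursion total; 39 exceeds any depth inside Pre_
def pvGoA : Nat → Int → Int × Int
  | 0, _ => (0, 0)
  | fuel + 1, precision =>
    if 1 ≤ precision ∧ precision ≤ 38 then
      match DECIMAL_PRECISION_TO_VALUE.get? precision with
      | some max_value => (Int.not max_value, max_value)
      | none => pvGoA fuel (precision - 1)
    else (0, 0)  -- assert fails: outside Pre_

def decimal_range_from_precision (precision : Int) : Int × Int :=
  pvGoA 39 precision

-- ===== PORT B =====
def pvThresholds : List Int := [1, 3, 5, 7, 10, 12, 15, 17, 19, 22, 24, 27, 29, 32, 34, 36]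

-- the while-loop of Source B; fuel only bounds the loop (hi - lo ≤ 16 and it
-- shrinks every iteration, so fuel 16 is never exhausted).
-- _THRESHOLDS[mid] : mid is always in range (lo ≤ mid < hi ≤ 16), so getD is exact.
def pvBisect : Nat → Int → Nat → Nat → Nat
  | 0, _, lo, _ => lo
  | fuel + 1, precision, lo, hi =>
    if lo < hi then
      let mid := (lo + hi) / 2
      if pvThresholds.getD mid 0 ≤ precision then
        pvBisect fuel precision (mid + 1) hi
      else
        pvBisect fuel precision lo mid
    else lo

def decimal_range_from_precision_alt (precision : Int) : Int × Int :=
  if 1 ≤ precision ∧ precision ≤ 38 then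
    let lo := pvBisect 16 precision 0 pvThresholds.length
    let max_value := ((1 : Int) <<< (8 * lo - 1)) - 1
    (Int.not max_value, max_value)
  else (0, 0)  -- assert fails: outside Pre_

-- ===== PRECONDITION & SPEC =====
-- A raises AssertionError outside 1 ≤ precision ≤ 38.
def Pre_decimal_range_from_precision (precision : Int) : Prop := 1 ≤ precision ∧ precision ≤ 38
instance (precision : Int) : Decidable (Pre_decimal_range_from_precision precision) := by
  unfold Pre_decimal_range_from_precision; infer_instance

def pvWitness_decimal_range_from_precision : Int := 7

def Spec_decimal_range_from_precision (precision : Int) (out : Int × Int) : Prop := out = decimal_range_from_precision_alt precision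
instance (precision : Int) (out : Int × Int) : Decidable (Spec_decimal_range_from_precision precision out) := by unfold Spec_decimal_range_from_precision; infer_instance

-- ===== CLAIM (what is proved, stated in full; the proofs are below) =====
def Claim_equal_decimal_range_from_precision : Prop := ∀ (precision : Int), Dom_decimal_range_from_precision precision → Pre_decimal_range_from_precision precision → Spec_decimal_range_from_precision precision (decimal_range_from_precision precision)

-- ===== LEMMAS AND PROOFS =====

-- ===== VERDICT (by name: the statement is the Claim_ definition above) =====
theorem decimal_range_from_precision_spec : Claim_equal_decimal_range_from_precision := by
  intro p _ hpre
  obtain ⟨h1, h2⟩ := hpre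
  unfold Spec_decimal_range_from_precision
  interval_cases p <;> decide
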